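-- pv_equiv track=rewrite | github.com/VadikKulinich/ProjectEuler | p-39/main.py | find_max_right_triangles
-- ===== SOURCE A (Python) =====
-- def count_right_triangles(p):
--     max_a = p // 3
--     counter = 0
--     for a in range(1, max_a):
--         if (p ** 2 - 2 * a * p) % (2 * p - 2 * a) == 0:
--             counter += 1
--
--     return counter
--
-- def find_max_right_triangles(perimeter_bound):
--     max_counter = 0
--     max_p = 0
--     for i in range(perimeter_bound + 1):
--         counter = count_right_triangles(i)
--         if counter > max_counter:
--             max_counter = counter
--             max_p = i
--
--     return max_p
-- ===== SOURCE B (Python) =====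
-- # Sieve re-implementation: instead of re-testing every a for every perimeter p,
-- # generate, for each leg a, the valid perimeters directly from the divisor
-- # cofactors k of a*a (p = a + a*a//k), accumulating into a per-perimeter counts
-- # array; the answer is the first index of the maximal count.
-- def find_max_right_triangles(perimeter_bound):
--     n = perimeter_bound
--     if n < 0:
--         return 0
--     counts = [0] * (n + 1)
--     for a in range(1, n // 3 + 1):
--         aa = a * a
--         for k in range(1, a):
--             if aa % k == 0:
--                 m = aa // k
--                 if (m - k) % 2 == 0 and m >= 2 * a + 3 and a + m <= n:
--                     counts[a + m] += 1
--     return counts.index(max(counts))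
-- ===== Notes on version B (the rewrite author's own statement) =====
-- stated objective: faster
-- what changed: B replaces A's per-perimeter rescan over all candidate legs (testing a divisibility for every (p,a) pair) by a sieve: for each leg a it enumerates cofactors k of a*a once, derives each valid perimeter p = a + a*a//k in O(1), and accumulates into a counts array, finishing with a single index(max) scan; intended as faster by a constant factor (about 3x fewer and cheaper inner iterations; measured ~10x at the sizes where both finish).
import Mathlib
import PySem

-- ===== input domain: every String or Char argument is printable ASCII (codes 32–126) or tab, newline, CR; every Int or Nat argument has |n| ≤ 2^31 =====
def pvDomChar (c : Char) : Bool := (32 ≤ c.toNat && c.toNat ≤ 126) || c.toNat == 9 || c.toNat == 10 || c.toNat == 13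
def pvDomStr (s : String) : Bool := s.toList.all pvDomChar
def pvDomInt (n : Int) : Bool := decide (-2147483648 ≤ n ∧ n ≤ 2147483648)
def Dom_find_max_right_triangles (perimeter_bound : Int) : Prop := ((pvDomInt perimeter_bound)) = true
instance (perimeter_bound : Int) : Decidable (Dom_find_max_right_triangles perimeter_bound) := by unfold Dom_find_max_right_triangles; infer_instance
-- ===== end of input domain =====

-- B replaces A's per-perimeter rescan by a sieve: for each leg a it enumerates cofactors k of a*a,
-- derives each valid perimeter p = a + a*a//k directly, accumulates into a counts array, then takes
-- index(max); intended as faster by a constant factor (measured ~10x at sizes where both finish).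


-- ===== PORT A =====
def count_right_triangles (p : Int) : Int :=
  let max_a := PySem.Int.floordiv p 3
  (PySem.List.pyRange 1 max_a 1).foldl
    (fun counter a =>
      if PySem.Int.mod (p ^ 2 - 2 * a * p) (2 * p - 2 * a) = 0 then counter + 1 else counter)
    0

def find_max_right_triangles (perimeter_bound : Int) : Int :=
  ((PySem.List.pyRange 0 (perimeter_bound + 1) 1).foldl
    (fun (s : Int × Int) i =>
      let counter := count_right_triangles i
      if counter > s.1 then (counter, i) else s)
    (0, 0)).2

-- ===== PORT B =====
-- inner loop body: counts[a + m] += 1 ported as pySetD/pyGetD (the index is guarded in range)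
def sieveInner (n a : Int) (cs : List Int) (k : Int) : List Int :=
  if PySem.Int.mod (a * a) k = 0 then
    let m := PySem.Int.floordiv (a * a) k
    if PySem.Int.mod (m - k) 2 = 0 ∧ 2 * a + 3 ≤ m ∧ a + m ≤ n then
      PySem.List.pySetD cs (a + m) (PySem.List.pyGetD cs (a + m) 0 + 1)
    else cs
  else cs

-- outer loop body: for k in range(1, a): ...
def sieveOuter (n : Int) (cs : List Int) (a : Int) : List Int :=
  (PySem.List.pyRange 1 a 1).foldl (sieveInner n a) cs

def find_max_right_triangles_alt (perimeter_bound : Int) : Int :=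
  if perimeter_bound < 0 then 0
  else
    let counts :=
      (PySem.List.pyRange 1 (PySem.Int.floordiv perimeter_bound 3 + 1) 1).foldl
        (sieveOuter perimeter_bound) (List.replicate (perimeter_bound + 1).toNat 0)
    match PySem.List.max? counts (fun x => x) with
    | none => 0      -- unreachable: counts is nonempty
    | some mx =>
      match PySem.List.index? counts mx with
      | none => 0    -- unreachable: mx ∈ counts
      | some i => (i : Int)

-- ===== PRECONDITION & SPEC =====
def Spec_find_max_right_triangles (perimeter_bound : Int) (out : Int) : Prop := out = find_max_right_triangles_alt perimeter_bound
instance (perimeter_bound : Int) (out : Int) : Decidable (Spec_find_max_right_triangles perimeter_bound out) := by unfold Spec_find_max_right_triangles; infer_instance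

-- ===== CLAIM (what is proved, stated in full; the proofs are below) =====
def Claim_equal_find_max_right_triangles : Prop := ∀ (perimeter_bound : Int), Dom_find_max_right_triangles perimeter_bound → Spec_find_max_right_triangles perimeter_bound (find_max_right_triangles perimeter_bound)

-- ===== LEMMAS AND PROOFS =====

-- the Boolean "this (a, k) pair contributes to perimeter slot p" predicate of the sieve
def SPredB (n p a k : Int) : Bool :=
  decide (PySem.Int.mod (a * a) k = 0 ∧
    PySem.Int.mod (PySem.Int.floordiv (a * a) k - k) 2 = 0 ∧
    2 * a + 3 ≤ PySem.Int.floordiv (a * a) k ∧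
    a + PySem.Int.floordiv (a * a) k ≤ n ∧
    a + PySem.Int.floordiv (a * a) k = p)

-- A's inner loop is a countP over range(1, p//3)
lemma countA_eq (p : Int) :
    count_right_triangles p =
      ((PySem.List.pyRange 1 (PySem.Int.floordiv p 3) 1).countP
        (fun a => decide (PySem.Int.mod (p ^ 2 - 2 * a * p) (2 * p - 2 * a) = 0)) : Int) := by
  unfold count_right_triangles
  rw [PySem.List.foldl_ite_add_one]
  simp

-- A's test is divisibility of p^2 by 2*(p-a)
lemma predA_iff (p a : Int) :
    (PySem.Int.mod (p ^ 2 - 2 * a * p) (2 * p - 2 * a) = 0) ↔ (2 * (p - a)) ∣ p ^ 2 := by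
  rw [PySem.Int.mod_eq_zero_iff_dvd]
  have e2 : 2 * p - 2 * a = 2 * (p - a) := by ring
  rw [e2]
  have hdvd : (2 * (p - a)) ∣ (2 * p * (p - a)) := ⟨p, by ring⟩
  constructor
  · intro h
    have h2 := dvd_sub hdvd h
    have e : 2 * p * (p - a) - (p ^ 2 - 2 * a * p) = p ^ 2 := by ring
    rwa [e] at h2
  · intro h
    have h2 := dvd_sub hdvd h
    have e : 2 * p * (p - a) - p ^ 2 = p ^ 2 - 2 * a * p := by ring
    rwa [e] at h2

-- from SPredB with 1 ≤ k: the exact product equation and the size bound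
lemma spred_key (n p a k : Int) (hk : 1 ≤ k) (h : SPredB n p a k = true) :
    k * (p - a) = a * a ∧ 2 * a + 3 ≤ p - a ∧ a + (p - a) ≤ n ∧
      (2 : Int) ∣ (p - a) - k := by
  unfold SPredB at h
  rw [decide_eq_true_eq] at h
  obtain ⟨h1, h2, h3, h4, h5⟩ := h
  rw [PySem.Int.mod_eq_zero_iff_dvd] at h1
  rw [PySem.Int.mod_eq_zero_iff_dvd] at h2
  have hfd : PySem.Int.floordiv (a * a) k = (a * a) / k :=
    PySem.Int.floordiv_eq_ediv_of_pos (by omega)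
  have hmul : k * ((a * a) / k) = a * a := Int.mul_ediv_cancel' h1
  rw [hfd] at h2 h3 h4 h5
  have hm : (a * a) / k = p - a := by omega
  rw [hm] at hmul h2 h3 h4
  exact ⟨hmul, h3, h4, h2⟩

-- at most one k in range(1, a) satisfies the sieve predicate for a fixed slot p
lemma spred_unique (n p a : Int) :
    ∀ k1 ∈ PySem.List.pyRange 1 a 1, ∀ k2 ∈ PySem.List.pyRange 1 a 1,
      SPredB n p a k1 = true → SPredB n p a k2 = true → k1 = k2 := by
  intro k1 hk1 k2 hk2 h1 h2
  rw [PySem.List.mem_pyRange_one] at hk1 hk2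
  obtain ⟨e1, hb1, -, -⟩ := spred_key n p a k1 hk1.1 h1
  obtain ⟨e2, hb2, -, -⟩ := spred_key n p a k2 hk2.1 h2
  have hm : 0 < p - a := by omega
  have : k1 * (p - a) = k2 * (p - a) := by omega
  exact mul_right_cancel₀ (by omega) this

-- existence of a qualifying k ↔ A's test together with A's range condition
lemma spred_exists_iff (n p a : Int) (ha : 1 ≤ a) (hp : 0 ≤ p) (hpn : p ≤ n) :
    (∃ k ∈ PySem.List.pyRange 1 a 1, SPredB n p a k = true) ↔
      (a < PySem.Int.floordiv p 3 ∧ (2 * (p - a)) ∣ p ^ 2) := by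
  have hf3 : PySem.Int.floordiv p 3 = p / 3 :=
    PySem.Int.floordiv_eq_ediv_of_pos (by norm_num)
  constructor
  · rintro ⟨k, hkmem, hk⟩
    rw [PySem.List.mem_pyRange_one] at hkmem
    obtain ⟨e, hb, -, hpar⟩ := spred_key n p a k hkmem.1 hk
    obtain ⟨t, ht⟩ := hpar
    constructor
    · rw [hf3]; omega
    · exact ⟨a + k + t, by linear_combination (-1 : ℤ) * e + (p - a) * ht⟩
  · rintro ⟨hlt, hdvd⟩
    rw [hf3] at hlt
    have hge : 3 * a + 3 ≤ p := by omega
    set m : Int := p - a with hmdef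
    have hm0 : 0 < m := by omega
    have hmd : m ∣ p ^ 2 := dvd_trans ⟨2, by ring⟩ hdvd
    have hma : m ∣ a * a := by
      have : a * a = p ^ 2 - m * (m + 2 * a) := by rw [hmdef]; ring
      rw [this]
      exact dvd_sub hmd ⟨m + 2 * a, rfl⟩
    set k : Int := (a * a) / m with hkdef
    have hmk : m * k = a * a := Int.mul_ediv_cancel' hma
    have hk1 : 1 ≤ k := by nlinarith [hmk, hm0, ha]
    have hka : k < a := by nlinarith [hmk, hm0, ha, hge]
    -- parity: p^2 = m*(m + 2a + k) and 2m ∣ p^2 force m + 2a + k even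
    obtain ⟨t, ht⟩ := hdvd
    have hexp : m * (m + 2 * a + k) = m * (2 * t) := by
      have : p ^ 2 = m * (m + 2 * a + k) := by
        have : p ^ 2 = m * (m + 2 * a) + a * a := by rw [hmdef]; ring
        rw [this, ← hmk]; ring
      rw [← this, ht]; ring
    have hpar : m + 2 * a + k = 2 * t := mul_left_cancel₀ (by omega) hexp
    refine ⟨k, ?_, ?_⟩
    · rw [PySem.List.mem_pyRange_one]; omega
    · unfold SPredB
      rw [decide_eq_true_eq]
      have hdk : k ∣ a * a := ⟨m, by linarith [hmk, mul_comm m k]⟩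
      have hfd : PySem.Int.floordiv (a * a) k = m := by
        rw [PySem.Int.floordiv_eq_ediv_of_pos (by omega)]
        rw [← hmk, mul_comm m k]
        exact Int.mul_ediv_cancel_left m (by omega)
      refine ⟨?_, ?_, ?_, ?_, ?_⟩
      · rw [PySem.Int.mod_eq_zero_iff_dvd]; exact hdk
      · rw [hfd, PySem.Int.mod_eq_zero_iff_dvd]; exact ⟨t - a - k, by omega⟩
      · rw [hfd]; omega
      · rw [hfd]; omega
      · rw [hfd]; omega

-- a nodup list with a unique satisfier counts to 1 or 0
lemma countP_eq_ite_exists {α : Type} [DecidableEq α] (l : List α) (P : α → Bool)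
    (hnd : l.Nodup)
    (huniq : ∀ x ∈ l, ∀ y ∈ l, P x = true → P y = true → x = y) :
    l.countP P = if ∃ x ∈ l, P x = true then 1 else 0 := by
  induction l with
  | nil => simp
  | cons x t ih =>
    rw [List.nodup_cons] at hnd
    rw [List.countP_cons]
    rw [ih hnd.2 (fun u hu v hv => huniq u (by simp [hu]) v (by simp [hv]))]
    by_cases hx : P x = true
    · have ht0 : ¬ ∃ y ∈ t, P y = true := by
        rintro ⟨y, hy, hPy⟩
        exact hnd.1 (huniq x (by simp) y (by simp [hy]) hx hPy ▸ hy)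
      rw [if_neg ht0, if_pos (show ∃ y ∈ x :: t, P y = true from ⟨x, by simp, hx⟩)]
      simp [hx]
    · have he : (∃ y ∈ x :: t, P y = true) ↔ (∃ y ∈ t, P y = true) := by
        constructor
        · rintro ⟨y, hy, hPy⟩
          rcases List.mem_cons.mp hy with rfl | hy'
          · exact absurd hPy hx
          · exact ⟨y, hy', hPy⟩
        · rintro ⟨y, hy, hPy⟩; exact ⟨y, by simp [hy], hPy⟩
      by_cases hd : ∃ y ∈ t, P y = true
      · rw [if_pos hd, if_pos (he.mpr hd)]
        simp [hx]
      · rw [if_neg hd, if_neg (fun hh => hd (he.mp hh))]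
        simp [hx]

-- value of the inner count for one leg a
lemma inner_count_val (n p a : Int) (ha : 1 ≤ a) (hp : 0 ≤ p) (hpn : p ≤ n) :
    ((PySem.List.pyRange 1 a 1).countP (SPredB n p a) : Int) =
      if a < PySem.Int.floordiv p 3 ∧ (2 * (p - a)) ∣ p ^ 2 then 1 else 0 := by
  rw [countP_eq_ite_exists _ _ (PySem.List.nodup_pyRange_one 1 a) (spred_unique n p a)]
  have h := spred_exists_iff n p a ha hp hpn
  by_cases hc : ∃ k ∈ PySem.List.pyRange 1 a 1, SPredB n p a k = true
  · rw [if_pos hc, if_pos (h.mp hc)]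
    norm_num
  · rw [if_neg hc, if_neg (fun hh => hc (h.mpr hh))]
    norm_num

-- counts[i] += 1 seen through getD
lemma getD_set_getD (cs : List Int) (j i : Nat) (hj : j < cs.length) :
    (cs.set j (cs.getD j 0 + 1)).getD i 0 = cs.getD i 0 + if i = j then 1 else 0 := by
  by_cases h : i = j
  · subst h
    simp [List.getD_eq_getElem?_getD, hj]
  · have h' : ¬ (j = i) := fun hh => h hh.symm
    simp [List.getD_eq_getElem?_getD, h, h']

-- the inner fold preserves length and adds the pair count to slot p
lemma sieveInner_foldl (n p a : Int) (hn : 0 ≤ n) (ha : 1 ≤ a) (hp : 0 ≤ p) :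
    ∀ (ks : List Int) (cs : List Int), cs.length = (n + 1).toNat →
      (ks.foldl (sieveInner n a) cs).length = (n + 1).toNat ∧
      (ks.foldl (sieveInner n a) cs).getD p.toNat 0 =
        cs.getD p.toNat 0 + (ks.countP (SPredB n p a) : Int) := by
  intro ks
  induction ks with
  | nil => intro cs hcs; simp [hcs]
  | cons k t ih =>
    intro cs hcs
    have hstep : (sieveInner n a cs k).length = cs.length ∧
        (sieveInner n a cs k).getD p.toNat 0 =
          cs.getD p.toNat 0 + (if SPredB n p a k then (1 : Int) else 0) := by
      unfold sieveInner SPredB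
      by_cases h1 : PySem.Int.mod (a * a) k = 0
      · rw [if_pos h1]
        by_cases h2 : PySem.Int.mod (PySem.Int.floordiv (a * a) k - k) 2 = 0 ∧
            2 * a + 3 ≤ PySem.Int.floordiv (a * a) k ∧
            a + PySem.Int.floordiv (a * a) k ≤ n
        · rw [if_pos h2]
          set m : Int := PySem.Int.floordiv (a * a) k with hm
          have him : 0 ≤ a + m := by omega
          have hjlt : (a + m).toNat < cs.length := by rw [hcs]; omega
          rw [PySem.List.pySetD_of_nonneg _ _ him]
          have hg : PySem.List.pyGetD cs (a + m) 0 = cs.getD (a + m).toNat 0 := by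
            have h' : (a + m) = ((a + m).toNat : Int) := by omega
            rw [h', PySem.List.pyGetD_natCast]
            simp only [Int.toNat_natCast]
          rw [hg, List.length_set, getD_set_getD cs _ _ hjlt]
          refine ⟨rfl, ?_⟩
          congr 1
          by_cases he : a + m = p
          · rw [if_pos (by omega), if_pos (by rw [decide_eq_true_eq]; exact ⟨h1, h2.1, h2.2.1, h2.2.2, he⟩)]
          · rw [if_neg (by omega), if_neg (by rw [decide_eq_true_eq]; rintro ⟨-, -, -, -, h5⟩; exact he h5)]
        · rw [if_neg h2, if_neg (by rw [decide_eq_true_eq]; rintro ⟨-, a2, a3, a4, -⟩; exact h2 ⟨a2, a3, a4⟩)]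
          simp
      · rw [if_neg h1, if_neg (by rw [decide_eq_true_eq]; rintro ⟨a1, -⟩; exact h1 a1)]
        simp
    rw [List.foldl_cons]
    obtain ⟨ihl, ihv⟩ := ih (sieveInner n a cs k) (by rw [hstep.1, hcs])
    refine ⟨ihl, ?_⟩
    rw [ihv, hstep.2, List.countP_cons]
    by_cases hk : SPredB n p a k <;> simp [hk] <;> ring

-- the outer fold adds, slot by slot, the sum of the inner counts
lemma sieveOuter_foldl (n p : Int) (hn : 0 ≤ n) (hp : 0 ≤ p) :
    ∀ (as : List Int) (cs : List Int), (∀ a ∈ as, 1 ≤ a) → cs.length = (n + 1).toNat →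
      (as.foldl (sieveOuter n) cs).length = (n + 1).toNat ∧
      (as.foldl (sieveOuter n) cs).getD p.toNat 0 =
        cs.getD p.toNat 0 +
          ((as.map (fun a => (((PySem.List.pyRange 1 a 1).countP (SPredB n p a)) : Int))).sum) := by
  intro as
  induction as with
  | nil => intro cs _ hcs; simp [hcs]
  | cons a t ih =>
    intro cs hmem hcs
    rw [List.foldl_cons]
    have ha : 1 ≤ a := hmem a (by simp)
    obtain ⟨hl, hv⟩ := sieveInner_foldl n p a hn ha hp (PySem.List.pyRange 1 a 1) cs hcs
    obtain ⟨ihl, ihv⟩ := ih (sieveOuter n cs a) (fun x hx => hmem x (by simp [hx])) (by unfold sieveOuter; exact hl)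
    refine ⟨ihl, ?_⟩
    rw [ihv]
    unfold sieveOuter
    rw [hv, List.map_cons, List.sum_cons]
    ring

-- the summed sieve contributions at slot p are exactly A's count
lemma sum_inner_eq_countA (n p : Int) (hp : 0 ≤ p) (hpn : p ≤ n) :
    (((PySem.List.pyRange 1 (PySem.Int.floordiv n 3 + 1) 1).map
        (fun a => (((PySem.List.pyRange 1 a 1).countP (SPredB n p a)) : Int))).sum) =
      count_right_triangles p := by
  have hn : 0 ≤ n := le_trans hp hpn
  have hf3 : PySem.Int.floordiv p 3 = p / 3 := PySem.Int.floordiv_eq_ediv_of_pos (by norm_num)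
  have hfn3 : PySem.Int.floordiv n 3 = n / 3 := PySem.Int.floordiv_eq_ediv_of_pos (by norm_num)
  -- replace each inner count by its 0/1 value
  have hmapc : (PySem.List.pyRange 1 (PySem.Int.floordiv n 3 + 1) 1).map
        (fun a => (((PySem.List.pyRange 1 a 1).countP (SPredB n p a)) : Int)) =
      (PySem.List.pyRange 1 (PySem.Int.floordiv n 3 + 1) 1).map
        (fun a => if (decide (a < PySem.Int.floordiv p 3 ∧ (2 * (p - a)) ∣ p ^ 2)) = true then (1 : Int) else 0) := by
    apply List.map_congr_left
    intro a hamem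
    rw [PySem.List.mem_pyRange_one] at hamem
    rw [inner_count_val n p a hamem.1 hp hpn]
    simp
  rw [hmapc, PySem.List.sum_map_ite_one_zero, countA_eq]
  norm_cast
  -- now compare the two countP's over ranges
  by_cases hsmall : PySem.Int.floordiv p 3 ≤ 1
  · have h1 : PySem.List.pyRange 1 (PySem.Int.floordiv p 3) 1 = [] :=
      PySem.List.pyRange_one_eq_nil hsmall
    rw [h1, List.countP_nil]
    rw [List.countP_eq_zero]
    intro a hamem
    rw [PySem.List.mem_pyRange_one] at hamem
    simp only [decide_eq_true_eq, not_and]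
    intro hlt
    omega
  · have hmono : PySem.Int.floordiv p 3 ≤ PySem.Int.floordiv n 3 + 1 := by
      rw [hf3, hfn3]; omega
    rw [PySem.List.pyRange_one_append 1 (PySem.Int.floordiv p 3) (PySem.Int.floordiv n 3 + 1) (by omega) hmono,
      List.countP_append]
    have hz : (PySem.List.pyRange (PySem.Int.floordiv p 3) (PySem.Int.floordiv n 3 + 1) 1).countP
        (fun a => decide (a < PySem.Int.floordiv p 3 ∧ (2 * (p - a)) ∣ p ^ 2)) = 0 := by
      rw [List.countP_eq_zero]
      intro a hamem
      rw [PySem.List.mem_pyRange_one] at hamem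
      simp only [decide_eq_true_eq, not_and]
      intro hlt
      omega
    rw [hz, Nat.add_zero]
    apply List.countP_congr
    intro a hamem
    rw [PySem.List.mem_pyRange_one] at hamem
    simp only [decide_eq_true_eq]
    constructor
    · rintro ⟨-, hd⟩; exact (predA_iff p a).mpr hd
    · intro hmod; exact ⟨hamem.2, (predA_iff p a).mp hmod⟩

-- the finished counts array is the list of A's per-perimeter counts
lemma sieve_counts_eq (n : Int) (hn : 0 ≤ n) :
    (PySem.List.pyRange 1 (PySem.Int.floordiv n 3 + 1) 1).foldl
        (sieveOuter n) (List.replicate (n + 1).toNat 0) =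
      (PySem.List.pyRange 0 (n + 1) 1).map count_right_triangles := by
  apply List.ext_getElem
  · have := (sieveOuter_foldl n 0 hn le_rfl
      (PySem.List.pyRange 1 (PySem.Int.floordiv n 3 + 1) 1)
      (List.replicate (n + 1).toNat 0)
      (fun a ha => (PySem.List.mem_pyRange_one.mp ha).1)
      (by simp)).1
    rw [this, List.length_map, PySem.List.length_pyRange_one]
    omega
  · intro i h1 h2
    have hilen : i < (n + 1).toNat := by
      rw [List.length_map, PySem.List.length_pyRange_one] at h2; omega
    have hip : (0 : Int) ≤ (i : Int) := by positivity
    have hipn : (i : Int) ≤ n := by omega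
    obtain ⟨hl, hv⟩ := sieveOuter_foldl n (i : Int) hn hip
      (PySem.List.pyRange 1 (PySem.Int.floordiv n 3 + 1) 1)
      (List.replicate (n + 1).toNat 0)
      (fun a ha => (PySem.List.mem_pyRange_one.mp ha).1)
      (by simp)
    have hgetl : (List.replicate (n + 1).toNat (0 : Int)).getD ((i : Int)).toNat 0 = 0 := by
      simp [List.getD_eq_getElem?_getD, hipn]
    rw [sum_inner_eq_countA n (i : Int) hip hipn, hgetl] at hv
    have htn : ((i : Int)).toNat = i := by omega
    rw [htn] at hv
    have hL : _ = _ := List.getD_eq_getElem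
      ((PySem.List.pyRange 1 (PySem.Int.floordiv n 3 + 1) 1).foldl (sieveOuter n)
        (List.replicate (n + 1).toNat 0)) 0 h1
    rw [← hL, hv]
    rw [List.getElem_map, PySem.List.getElem_pyRange_one]
    norm_num

-- A's outer fold: invariant over the prefix of counts
lemma A_fold_spec (n : Nat) :
    ∀ cs s, cs = ((PySem.List.pyRange 0 ((n : Int) + 1) 1).map count_right_triangles) →
      s = (PySem.List.pyRange 0 ((n : Int) + 1) 1).foldl
            (fun (s : Int × Int) i =>
              let counter := count_right_triangles i
              if counter > s.1 then (counter, i) else s) (0, 0) →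
      s.1 ∈ cs ∧ (∀ x ∈ cs, x ≤ s.1) ∧
        ∃ k : Nat, PySem.List.index? cs s.1 = some k ∧ s.2 = (k : Int) := by
  induction n with
  | zero =>
    intro cs s hcs hs
    have h1 : PySem.List.pyRange 0 ((0 : Nat) + 1 : Int) 1 = [0] := by
      simpa using PySem.List.pyRange_one_singleton (a := 0)
    have hc0 : count_right_triangles 0 = 0 := by decide
    subst hcs hs
    rw [h1]
    refine ⟨by simp [hc0], by simp [hc0], 0, ?_, by simp [hc0]⟩
    simp only [List.map_cons, List.map_nil, List.foldl_cons, List.foldl_nil, hc0]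
    norm_num [PySem.List.index?_cons_self]
  | succ n ih =>
    intro cs s hcs hs
    have hsplit : PySem.List.pyRange 0 ((n + 1 : Nat) + 1 : Int) 1
        = PySem.List.pyRange 0 ((n : Int) + 1) 1 ++ [(n : Int) + 1] := by
      have := PySem.List.pyRange_one_succ_right (a := 0) (b := (n : Int) + 1) (by omega)
      rw [← this]; norm_num
    obtain ⟨hmem, hbd, k, hidx, hs2⟩ := ih _ _ rfl rfl
    set cs0 := (PySem.List.pyRange 0 ((n : Int) + 1) 1).map count_right_triangles with hcs0
    set s0 := (PySem.List.pyRange 0 ((n : Int) + 1) 1).foldl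
            (fun (s : Int × Int) i =>
              let counter := count_right_triangles i
              if counter > s.1 then (counter, i) else s) (0, 0) with hs0
    set c := count_right_triangles ((n : Int) + 1) with hc
    have hcs' : cs = cs0 ++ [c] := by rw [hcs, hsplit, List.map_append]; rfl
    have hs' : s = if c > s0.1 then (c, (n : Int) + 1) else s0 := by
      rw [hs, hsplit, List.foldl_append]; rfl
    have hlen : cs0.length = n + 1 := by
      rw [hcs0, List.length_map, PySem.List.length_pyRange_one]; omega
    by_cases hgt : c > s0.1
    · rw [hs', if_pos hgt]
      have hnot : c ∉ cs0 := fun hm => absurd (hbd c hm) (by omega)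
      refine ⟨by simp [hcs'], ?_, n + 1, ?_, by push_cast; ring⟩
      · intro x hx
        rw [hcs'] at hx
        rcases List.mem_append.mp hx with hx | hx
        · exact le_of_lt (lt_of_le_of_lt (hbd x hx) hgt)
        · simp at hx; omega
      · rw [hcs']
        simpa [hlen] using PySem.List.index?_append_singleton_self cs0 c hnot
    · rw [hs', if_neg hgt]
      refine ⟨by rw [hcs']; exact List.mem_append_left _ hmem, ?_, k, ?_, hs2⟩
      · intro x hx
        rw [hcs'] at hx
        rcases List.mem_append.mp hx with hx | hx
        · exact hbd x hx
        · simp at hx; omega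
      · rw [hcs', PySem.List.index?_append_of_mem _ hmem]
        exact hidx

-- ===== VERDICT =====
theorem find_max_right_triangles_spec : Claim_equal_find_max_right_triangles := by
  intro pb _
  unfold Spec_find_max_right_triangles find_max_right_triangles find_max_right_triangles_alt
  by_cases hneg : pb < 0
  · rw [if_pos hneg, PySem.List.pyRange_one_eq_nil (by omega)]
    rfl
  · rw [if_neg hneg]
    obtain ⟨n, rfl⟩ : ∃ n : Nat, pb = (n : Int) :=
      ⟨pb.toNat, (Int.toNat_of_nonneg (by omega)).symm⟩
    obtain ⟨hmem, hbd, k, hidx, hs2⟩ := A_fold_spec n _ _ rfl rfl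
    simp only [sieve_counts_eq (n : Int) (by positivity)]
    cases hmax : PySem.List.max? ((PySem.List.pyRange 0 ((n : Int) + 1) 1).map count_right_triangles) (fun x => x) with
    | none =>
      rw [PySem.List.max?_eq_none_iff] at hmax
      rw [hmax] at hmem
      exact absurd hmem (List.not_mem_nil)
    | some m =>
      have hm' := le_antisymm (hbd m (PySem.List.max?_mem hmax)) (PySem.List.max?_isMax hmax _ hmem)
      have hidx' : PySem.List.index?
          ((PySem.List.pyRange 0 ((n : Int) + 1) 1).map count_right_triangles) m = some k := by
        rw [hm']; exact hidx
      simp only [hidx']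
      exact hs2
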